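-- pv_equiv track=rewrite | github.com/crapas1974/algo2 | datastructure/permitted_pattern.py | by_matching
-- ===== SOURCE A (Python) =====
-- def by_matching(inputs, pattern):
--     not_permitted_list = []
--     for i, input_pattern in enumerate(inputs):
--         n = inputs[i]
--         jari = 0
--         while n > 0:
--             if n % 2 == 1:
--                 if pattern[0] - jari - 1 in pattern[1]:
--                     not_permitted_list.append(i)
--                     break
--             n //= 2
--             jari += 1
--     return not_permitted_list
-- ===== SOURCE B (Python) =====
-- def by_matching(inputs, pattern):
--     size, forbidden = pattern
--     positions = [size - 1 - v for v in forbidden]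
--     return [i for i, n in enumerate(inputs)
--             if n > 0 and any(p >= 0 and (n >> p) & 1 for p in positions)]
-- ===== Notes on version B (the rewrite author's own statement) =====
-- stated objective: simpler
-- what changed: Instead of dividing each input bit by bit and scanning pattern[1] for each set bit, B precomputes the forbidden bit positions once from the pattern and flags an input with a single short-circuit shift-and-test per position.
import Mathlib
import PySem

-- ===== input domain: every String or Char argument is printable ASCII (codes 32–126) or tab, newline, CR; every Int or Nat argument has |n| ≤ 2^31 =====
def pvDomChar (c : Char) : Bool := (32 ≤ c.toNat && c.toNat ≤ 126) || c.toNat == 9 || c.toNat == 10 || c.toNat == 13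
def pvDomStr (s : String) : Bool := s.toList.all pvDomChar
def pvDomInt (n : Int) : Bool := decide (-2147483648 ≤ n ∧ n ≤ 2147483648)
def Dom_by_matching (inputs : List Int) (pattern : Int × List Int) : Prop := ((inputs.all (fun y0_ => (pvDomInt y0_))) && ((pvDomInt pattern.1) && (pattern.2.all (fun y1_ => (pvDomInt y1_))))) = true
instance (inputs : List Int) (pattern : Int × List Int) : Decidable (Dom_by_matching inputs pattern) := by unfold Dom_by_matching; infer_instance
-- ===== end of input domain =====

-- B replaces A's per-input bit-by-bit division loop with a precomputed list of forbidden
-- bit positions and a short-circuit bit test per input (objective: simpler).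

-- ===== PORT A =====
-- inner while loop of A: returns true iff the loop appends i (reaches `break`)
def hitA (size : Int) (forb : List Int) (n jari : Int) : Bool :=
  if h : 0 < n then
    if PySem.Int.mod n 2 = 1 ∧ forb.contains (size - jari - 1) then true
    else hitA size forb (PySem.Int.floordiv n 2) (jari + 1)
  else false
termination_by n.toNat
decreasing_by
  have : PySem.Int.floordiv n 2 = n / 2 := PySem.Int.floordiv_eq_ediv_of_pos (by omega)
  rw [this]; omega

def by_matching (inputs : List Int) (pattern : Int × List Int) : List Int :=
  (PySem.List.enumerate inputs).foldl
    (fun acc p => if hitA pattern.1 pattern.2 p.2 0 then acc ++ [p.1] else acc) []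

-- ===== PORT B =====
-- p >= 0 and (n >> p) & 1 : Python's `n >> p` is Lean's `n >>> p.toNat` (exact, see PYSEM.md)
def testb (n p : Int) : Bool := decide (0 ≤ p) && decide ((n >>> p.toNat) % 2 = 1)

def by_matching_alt (inputs : List Int) (pattern : Int × List Int) : List Int :=
  let positions := pattern.2.map (fun v => pattern.1 - 1 - v)
  (PySem.List.enumerate inputs).foldl
    (fun acc p => if decide (0 < p.2) && positions.any (fun q => testb p.2 q) then acc ++ [p.1] else acc) []

-- ===== PRECONDITION & SPEC =====
def Spec_by_matching (inputs : List Int) (pattern : Int × List Int) (out : List Int) : Prop := out = by_matching_alt inputs pattern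
instance (inputs : List Int) (pattern : Int × List Int) (out : List Int) : Decidable (Spec_by_matching inputs pattern out) := by unfold Spec_by_matching; infer_instance

-- ===== CLAIM (what is proved, stated in full; the proofs are below) =====
def Claim_equal_by_matching : Prop := ∀ (inputs : List Int) (pattern : Int × List Int), Dom_by_matching inputs pattern → Spec_by_matching inputs pattern (by_matching inputs pattern)

-- ===== LEMMAS AND PROOFS =====

theorem any_congr_mem {α : Type} (l : List α) (f g : α → Bool)
    (h : ∀ x ∈ l, f x = g x) : l.any f = l.any g := by
  induction l with
  | nil => rfl
  | cons a t ih =>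
    simp only [List.any_cons, h a (by simp)]
    rw [ih (fun x hx => h x (by simp [hx]))]

theorem testb_neg_pos (p : Int) (hp : p < 0) (n : Int) : testb n p = false := by
  simp [testb]; omega

theorem testb_zero_iff (n : Int) : testb n 0 = decide (n % 2 = 1) := by
  simp [testb]

theorem testb_succ (n p : Int) (hp : 0 < p) :
    testb n p = testb (n / 2) (p - 1) := by
  have h1 : p.toNat = (p - 1).toNat + 1 := by omega
  have hd : decide (0 ≤ p) = true := by simp; omega
  have hd' : decide (0 ≤ p - 1) = true := by simp; omega
  simp only [testb, Int.shiftRight_eq_div_pow, h1, hd, hd', Bool.true_and]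
  have h2 : ((2 ^ ((p - 1).toNat + 1) : Nat) : Int) = 2 * (2 ^ (p - 1).toNat : Nat) := by
    push_cast [pow_succ]; ring
  have h3 : n / ((2 ^ ((p - 1).toNat + 1) : Nat) : Int) = (n / 2) / ((2 ^ (p - 1).toNat : Nat) : Int) := by
    rw [h2, ← Int.ediv_ediv_of_nonneg (by omega : (0:Int) ≤ 2)]
  rw [h3]

theorem testb_of_nonpos (n : Int) (hn : n = 0) (p : Int) : testb n p = false := by
  subst hn; simp [testb, Int.shiftRight_eq_div_pow]

theorem hitA_eq (size : Int) (forb : List Int) :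
    ∀ (k : Nat) (n jari : Int), n.toNat = k → 0 ≤ n →
      hitA size forb n jari = forb.any (fun v => testb n (size - 1 - v - jari)) := by
  intro k
  induction k using Nat.strong_induction_on with
  | _ k ih =>
    intro n jari hk hn
    by_cases hpos : 0 < n
    · rw [hitA]
      simp only [hpos, dite_true]
      by_cases hc : PySem.Int.mod n 2 = 1 ∧ forb.contains (size - jari - 1)
      · rw [if_pos hc]
        refine Eq.symm ?_
        rw [List.any_eq_true]
        refine ⟨size - jari - 1, by simpa using hc.2, ?_⟩
        have hq : size - 1 - (size - jari - 1) - jari = 0 := by ring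
        rw [hq, testb_zero_iff]
        have := hc.1
        rw [PySem.Int.mod_eq_emod_of_pos (by omega)] at this
        simp [this]
      · rw [if_neg hc]
        have hfd : PySem.Int.floordiv n 2 = n / 2 := PySem.Int.floordiv_eq_ediv_of_pos (by omega)
        rw [hfd]
        rw [ih (n / 2).toNat (by omega) (n / 2) (jari + 1) rfl (by omega)]
        apply any_congr_mem
        intro v hv
        set q := size - 1 - v - jari with hqdef
        have hq1 : size - 1 - v - (jari + 1) = q - 1 := by rw [hqdef]; ring
        rw [hq1]
        rcases lt_trichotomy q 0 with h | h | h
        · rw [testb_neg_pos _ (by omega), testb_neg_pos _ h]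
        · -- q = 0 : then size - jari - 1 = v ∈ forb, so A's membership held and n % 2 ≠ 1
          have hvmem : forb.contains (size - jari - 1) := by
            have : size - jari - 1 = v := by omega
            rw [this]; simpa using hv
          have hm : ¬ PySem.Int.mod n 2 = 1 := fun hm => hc ⟨hm, hvmem⟩
          rw [PySem.Int.mod_eq_emod_of_pos (by omega)] at hm
          rw [h, testb_zero_iff, testb_neg_pos _ (by omega)]
          simp [hm]
        · rw [testb_succ n q h]
    · have h0 : n = 0 := by omega
      rw [hitA]
      simp only [hpos, dite_false]
      refine Eq.symm ?_
      simp [testb_of_nonpos n h0]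

theorem cond_eq (size : Int) (forb : List Int) (n : Int) :
    hitA size forb n 0 =
      (decide (0 < n) && (forb.map (fun v => size - 1 - v)).any (fun q => testb n q)) := by
  by_cases hp : 0 < n
  · rw [hitA_eq size forb n.toNat n 0 rfl (le_of_lt hp)]
    simp [hp, List.any_map, Function.comp_def]
  · rw [hitA]
    simp [hp]

-- ===== VERDICT (by name: the statement is the Claim_ definition above) =====
theorem by_matching_spec : Claim_equal_by_matching := by
  intro inputs pattern _
  unfold Spec_by_matching by_matching by_matching_alt
  simp only []
  congr 1
  funext acc p
  rw [cond_eq]
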